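-- pv_equiv track=rewrite | github.com/Lab-ANT/ISSD | miniutils.py | state_seq_to_seg_json
-- ===== SOURCE A (Python) =====
-- def state_seq_to_seg_json(state_seq):
--     """
--     Convert state sequence to json format label.
--     The json format label is like: {100: 1, 200: 2, 300: 1, 400: 0},
--     where the key is the index of change point, and the value is the state.
--     The last change point is the end of the time series.
--     """
--     seg_json = {}
--     pre = state_seq[0]
--     for idx, e in enumerate(state_seq[1:]):
--         if e != pre:
--             seg_json[idx+1] = pre
--             pre = e
--     seg_json[len(state_seq)] = pre
--     return seg_json
-- ===== SOURCE B (Python) =====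
-- def state_seq_to_seg_json(state_seq):
--     # Run-length decomposition: split into maximal runs, emit one entry per run
--     # at its cumulative end position.  Returns {} on empty input (A raises there).
--     def runs(seq):
--         out = []
--         i = 0
--         n = len(seq)
--         while i < n:
--             j = i + 1
--             while j < n and seq[j] == seq[i]:
--                 j += 1
--             out.append((seq[i], j - i))
--             i = j
--         return out
--     seg_json = {}
--     pos = 0
--     for value, length in runs(state_seq):
--         pos += length
--         seg_json[pos] = value
--     return seg_json
-- ===== Notes on version B (the rewrite author's own statement) =====
-- stated objective: alternative
-- what changed: B first decomposes the sequence into maximal (value, run-length) runs and then emits one dict entry per run at the cumulative end position, instead of A's single element-by-element scan comparing each element with the previous one.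
import Mathlib
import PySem

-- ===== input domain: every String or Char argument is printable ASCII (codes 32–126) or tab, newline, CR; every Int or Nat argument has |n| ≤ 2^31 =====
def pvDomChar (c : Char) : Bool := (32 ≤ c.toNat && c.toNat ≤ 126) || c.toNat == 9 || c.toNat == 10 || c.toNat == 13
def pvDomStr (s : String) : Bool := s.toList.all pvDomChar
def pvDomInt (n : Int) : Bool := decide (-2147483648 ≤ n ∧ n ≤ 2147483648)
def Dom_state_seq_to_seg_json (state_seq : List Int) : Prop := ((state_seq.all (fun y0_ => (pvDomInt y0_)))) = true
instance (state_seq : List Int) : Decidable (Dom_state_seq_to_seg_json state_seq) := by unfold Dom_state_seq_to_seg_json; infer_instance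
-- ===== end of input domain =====

-- B replaces A's element-by-element change scan by a maximal-run decomposition with cumulative positions (alternative algorithm, same cost); on [] A raises IndexError while B returns [].


-- ===== PORT A =====
-- loop body of A's for-loop: acc = (seg_json, pre), ie = (idx, e)
def pvStepA (acc : PySem.Dict Int Int × Int) (ie : Int × Int) : PySem.Dict Int Int × Int :=
  if ie.2 ≠ acc.2 then (acc.1.insert (ie.1 + 1) acc.2, ie.2) else acc

def state_seq_to_seg_json (state_seq : List Int) : List (Int × Int) :=
  match state_seq with
  | [] => []  -- state_seq[0] raises IndexError here; excluded by Pre_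
  | p0 :: rest =>
    -- pre = state_seq[0]; for idx, e in enumerate(state_seq[1:]) (= rest): …
    let st := (PySem.List.enumerate rest 0).foldl pvStepA (PySem.Dict.empty, p0)
    (st.1.insert (state_seq.length : Int) st.2).items

-- ===== PORT B =====
-- number of leading elements of the list equal to v (B's inner while-loop)
def pvRunLen (v : Int) : List Int → Nat
  | [] => 0
  | x :: xs => if x = v then pvRunLen v xs + 1 else 0

-- B's helper runs(seq): maximal (value, run-length) decomposition
-- (fuel = length of the starting list, a totality guard only)
def pvRunsF : Nat → List Int → List (Int × Nat)
  | 0, _ => []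
  | _, [] => []
  | fuel + 1, x :: xs => (x, pvRunLen x xs + 1) :: pvRunsF fuel (xs.drop (pvRunLen x xs))

def pvRuns (l : List Int) : List (Int × Nat) := pvRunsF l.length l

def state_seq_to_seg_json_alt (state_seq : List Int) : List (Int × Int) :=
  ((pvRuns state_seq).foldl
      (fun (acc : PySem.Dict Int Int × Int) r =>
        (acc.1.insert (acc.2 + (r.2 : Int)) r.1, acc.2 + (r.2 : Int)))
      (PySem.Dict.empty, 0)).1.items

-- ===== PRECONDITION & SPEC =====
-- Pre_ excludes only the empty list, on which A raises IndexError.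
def Pre_state_seq_to_seg_json (state_seq : List Int) : Prop := state_seq ≠ []
instance (state_seq : List Int) : Decidable (Pre_state_seq_to_seg_json state_seq) := by
  unfold Pre_state_seq_to_seg_json; infer_instance
def pvWitness_state_seq_to_seg_json : List Int := [1, 1, 2]

def Spec_state_seq_to_seg_json (state_seq : List Int) (out : List (Int × Int)) : Prop :=
  out = state_seq_to_seg_json_alt state_seq
instance (state_seq : List Int) (out : List (Int × Int)) : Decidable (Spec_state_seq_to_seg_json state_seq out) := by
  unfold Spec_state_seq_to_seg_json; infer_instance

-- ===== CLAIM (what is proved, stated in full; the proofs are below) =====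
def Claim_equal_state_seq_to_seg_json : Prop := ∀ (state_seq : List Int), Dom_state_seq_to_seg_json state_seq → Pre_state_seq_to_seg_json state_seq → Spec_state_seq_to_seg_json state_seq (state_seq_to_seg_json state_seq)

-- ===== LEMMAS AND PROOFS =====
-- common reference function: change points of `rest` given previous value `pre`,
-- where the first element of `rest` has position `i`
def cp (pre i : Int) : List Int → List (Int × Int)
  | [] => [(i, pre)]
  | e :: rs => if e ≠ pre then (i, pre) :: cp e (i + 1) rs else cp pre (i + 1) rs

theorem insert_fresh_items (d : PySem.Dict Int Int) (k v : Int) (s : Int)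
    (hk : ∀ x ∈ d.keys, x ≤ s) (hgt : s < k) :
    (d.insert k v).items = d.items ++ [(k, v)] := by
  apply PySem.Dict.items_insert_of_not_contains
  rw [PySem.Dict.contains_eq_decide_mem_keys]
  simp only [decide_eq_false_iff_not]
  intro hmem
  have := hk k hmem
  omega

theorem lemA (rest : List Int) : ∀ (pre s : Int) (d : PySem.Dict Int Int),
    (∀ x ∈ d.keys, x ≤ s) →
    (((PySem.List.enumerate rest s).foldl pvStepA (d, pre)).1.insert
        (s + (rest.length : Int) + 1)
        ((PySem.List.enumerate rest s).foldl pvStepA (d, pre)).2).items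
      = d.items ++ cp pre (s + 1) rest := by
  induction rest with
  | nil =>
    intro pre s d hk
    simp [PySem.List.enumerate, cp]
    exact insert_fresh_items d (s + 1) pre s hk (by omega)
  | cons e rs ih =>
    intro pre s d hk
    rw [PySem.List.enumerate_cons]
    simp only [List.foldl_cons]
    by_cases he : e = pre
    · have hstep : pvStepA (d, pre) (s, e) = (d, pre) := by
        simp [pvStepA, he]
      rw [hstep]
      have := ih pre (s + 1) d (fun x hx => by have := hk x hx; omega)
      simp only [List.length_cons]
      push_cast
      have harith : s + ((rs.length : Int) + 1) + 1 = (s + 1) + (rs.length : Int) + 1 := by ring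
      rw [harith, this]
      simp [cp, he]
    · have hstep : pvStepA (d, pre) (s, e) = (d.insert (s + 1) pre, e) := by
        simp [pvStepA, he]
      rw [hstep]
      have hk' : ∀ x ∈ (d.insert (s + 1) pre).keys, x ≤ s + 1 := by
        intro x hx
        rcases (PySem.Dict.mem_keys_insert _ _ _ _).1 hx with h | h
        · omega
        · have := hk x h; omega
      have := ih e (s + 1) (d.insert (s + 1) pre) hk'
      simp only [List.length_cons]
      push_cast
      have harith : s + ((rs.length : Int) + 1) + 1 = (s + 1) + (rs.length : Int) + 1 := by ring
      rw [harith, this]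
      rw [insert_fresh_items d (s + 1) pre s hk (by omega)]
      simp [cp, he]

-- cp skips a prefix of elements equal to pre
theorem cp_skip (rest : List Int) : ∀ (pre i : Int),
    cp pre i rest = cp pre (i + (pvRunLen pre rest : Int)) (rest.drop (pvRunLen pre rest)) := by
  induction rest with
  | nil => intro pre i; simp [pvRunLen]
  | cons e rs ih =>
    intro pre i
    by_cases he : e = pre
    · subst he
      have h1 : pvRunLen e (e :: rs) = pvRunLen e rs + 1 := by simp [pvRunLen]
      have h2 : cp e i (e :: rs) = cp e (i + 1) rs := by simp [cp]
      rw [h1, h2, ih e (i + 1), List.drop_succ_cons]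
      congr 1
      push_cast
      ring
    · simp [pvRunLen, he, cp]

-- after dropping the run of pre, the head (if any) differs from pre
theorem drop_run_head (rest : List Int) : ∀ (pre : Int),
    ∀ e rs', rest.drop (pvRunLen pre rest) = e :: rs' → e ≠ pre := by
  induction rest with
  | nil => intro pre e rs' h; simp at h
  | cons x xs ih =>
    intro pre e rs' h
    by_cases hx : x = pre
    · simp only [pvRunLen, if_pos hx, List.drop_succ_cons] at h
      exact ih pre e rs' h
    · simp only [pvRunLen, if_neg hx, List.drop_zero] at h
      cases h; exact hx

theorem pvRunsF_nil (m : Nat) : pvRunsF m [] = [] := by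
  cases m <;> rfl

theorem lemB (n : Nat) : ∀ (rest : List Int), rest.length < n →
    ∀ (pre s : Int) (d : PySem.Dict Int Int),
    (∀ x ∈ d.keys, x ≤ s) →
    ((pvRunsF n (pre :: rest)).foldl
        (fun (acc : PySem.Dict Int Int × Int) r =>
          (acc.1.insert (acc.2 + (r.2 : Int)) r.1, acc.2 + (r.2 : Int)))
        (d, s)).1.items
      = d.items ++ cp pre (s + 1) rest := by
  induction n with
  | zero => intro rest hlen; omega
  | succ m ih =>
    intro rest hlen pre s d hk
    simp only [pvRunsF, List.foldl_cons]
    set k := pvRunLen pre rest with hkdef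
    have hcp := cp_skip rest pre (s + 1)
    rw [← hkdef] at hcp
    have hk1 : k ≤ rest.length := by
      clear hcp hlen
      induction rest with
      | nil => simp [hkdef, pvRunLen]
      | cons x xs ihx =>
        by_cases hx : x = pre
        · simp [hkdef, pvRunLen, hx] at *; omega
        · simp [hkdef, pvRunLen, hx]
    have hkey : s < s + ((k : Int) + 1) := by omega
    have hd' : ∀ x ∈ (d.insert (s + ((k : Int) + 1)) pre).keys, x ≤ s + ((k : Int) + 1) := by
      intro x hx
      rcases (PySem.Dict.mem_keys_insert _ _ _ _).1 hx with h | h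
      · omega
      · have := hk x h; omega
    cases hdrop : rest.drop k with
    | nil =>
      rw [pvRunsF_nil]
      simp only [List.foldl_nil]
      rw [hcp, hdrop]
      simp only [cp]
      push_cast
      rw [insert_fresh_items d (s + ((k : Int) + 1)) pre s hk hkey]
      congr 3
      ring
    | cons e rs' =>
      have hne : e ≠ pre := drop_run_head rest pre e rs' hdrop
      have hlen' : rs'.length < m := by
        have := congrArg List.length hdrop
        simp [List.length_drop] at this
        omega
      have := ih rs' hlen' e (s + ((k : Int) + 1)) (d.insert (s + ((k : Int) + 1)) pre) hd'
      push_cast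
      rw [this]
      rw [hcp, hdrop]
      simp only [cp, if_pos hne]
      rw [insert_fresh_items d (s + ((k : Int) + 1)) pre s hk hkey]
      simp only [List.append_assoc, List.cons_append, List.nil_append]
      congr 3
      · ring
      · ring

-- ===== VERDICT (by name: the statement is the Claim_ definition above) =====
theorem state_seq_to_seg_json_spec : Claim_equal_state_seq_to_seg_json := by
  intro state_seq _ hpre
  unfold Spec_state_seq_to_seg_json
  match state_seq with
  | [] => exact absurd rfl hpre
  | p0 :: rest =>
    show state_seq_to_seg_json (p0 :: rest) = state_seq_to_seg_json_alt (p0 :: rest)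
    unfold state_seq_to_seg_json state_seq_to_seg_json_alt pvRuns
    have hA := lemA rest p0 0 PySem.Dict.empty (by simp [PySem.Dict.keys_empty])
    have hB := lemB (p0 :: rest).length rest (by simp) p0 0 PySem.Dict.empty
      (by simp [PySem.Dict.keys_empty])
    simp only [zero_add] at hA hB
    rw [hB]
    have hlen : ((p0 :: rest).length : Int) = (rest.length : Int) + 1 := by
      push_cast [List.length_cons]; ring
    rw [hlen]
    exact hA
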